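-- pv_equiv track=rewrite | github.com/Luka-Peralta-Perez/AyED1-2024-TPs | TP1/Ejercicio_9.py | cajones
-- ===== SOURCE A (Python) =====
-- from typing import List, Tuple
--
-- def cajones(l: List[int]) -> Tuple[int, int, int]:
--     cajones_llenos = 0
--     naranjas_jugo = 0
--     sobrante = 0
--     cajon_actual = []
--     for n in l:
--         if n >= 200 and n <= 300:
--             cajon_actual.append(n)
--             if len(cajon_actual) == 100:
--                 cajones_llenos += 1
--                 cajon_actual = []
--         else:
--             naranjas_jugo += 1
--     if cajon_actual:
--         sobrante = len(cajon_actual)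
--     return cajones_llenos, naranjas_jugo, sobrante
-- ===== SOURCE B (Python) =====
-- from typing import List, Tuple
--
-- def cajones(l: List[int]) -> Tuple[int, int, int]:
--     valid = sum(1 for n in l if 200 <= n <= 300)
--     return valid // 100, len(l) - valid, valid % 100
-- ===== Notes on version B (the rewrite author's own statement) =====
-- stated objective: simpler
-- what changed: Replaces the crate-list simulation (fill/reset a list, count resets) with a single count of valid oranges and divmod-by-100 arithmetic for all three outputs.
import Mathlib
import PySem

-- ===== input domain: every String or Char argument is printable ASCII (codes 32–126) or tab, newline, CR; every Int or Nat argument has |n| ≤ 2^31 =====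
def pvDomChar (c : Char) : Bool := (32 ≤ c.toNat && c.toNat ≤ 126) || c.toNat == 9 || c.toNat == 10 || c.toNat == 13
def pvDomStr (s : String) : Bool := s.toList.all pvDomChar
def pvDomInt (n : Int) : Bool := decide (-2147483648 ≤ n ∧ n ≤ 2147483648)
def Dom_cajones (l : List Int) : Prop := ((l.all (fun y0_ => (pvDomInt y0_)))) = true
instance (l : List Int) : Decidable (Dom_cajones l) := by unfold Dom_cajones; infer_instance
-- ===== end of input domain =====

-- B replaces A's crate-list simulation by one count of valid oranges plus divmod arithmetic (objective: simpler).

-- ===== PORT A =====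
-- loop body of A: fill cajon_actual, reset it at 100 and bump cajones_llenos, else count juice
def cajonesStep (s : Int × Int × List Int) (n : Int) : Int × Int × List Int :=
  if 200 ≤ n ∧ n ≤ 300 then
    let c := s.2.2 ++ [n]
    if c.length = 100 then (s.1 + 1, s.2.1, []) else (s.1, s.2.1, c)
  else (s.1, s.2.1 + 1, s.2.2)

def cajones (l : List Int) : Int × Int × Int :=
  let s := l.foldl cajonesStep (0, 0, [])
  (s.1, s.2.1, if s.2.2 ≠ [] then (s.2.2.length : Int) else 0)

-- ===== PORT B =====
def cajones_alt (l : List Int) : Int × Int × Int :=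
  let valid : Nat := l.countP (fun n => decide (200 ≤ n) && decide (n ≤ 300))
  (((valid / 100 : Nat) : Int), (l.length : Int) - (valid : Int), ((valid % 100 : Nat) : Int))

-- ===== PRECONDITION & SPEC =====
def Spec_cajones (l : List Int) (out : Int × Int × Int) : Prop := out = cajones_alt l
instance (l : List Int) (out : Int × Int × Int) : Decidable (Spec_cajones l out) := by unfold Spec_cajones; infer_instance

-- ===== CLAIM (what is proved, stated in full; the proofs are below) =====
def Claim_equal_cajones : Prop := ∀ (l : List Int), Dom_cajones l → Spec_cajones l (cajones l)

-- ===== LEMMAS AND PROOFS =====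

-- loop invariant of A's fold: counters grow by divmod of the valid count, leftover crate has (len+valid) % 100 oranges
theorem cajones_fold_inv (l : List Int) : ∀ (ll ju : Int) (caj : List Int), caj.length < 100 →
    (l.foldl cajonesStep (ll, ju, caj)).1
        = ll + (((caj.length + l.countP (fun n => decide (200 ≤ n) && decide (n ≤ 300))) / 100 : Nat) : Int) ∧
    (l.foldl cajonesStep (ll, ju, caj)).2.1
        = ju + ((l.countP (fun n => !(decide (200 ≤ n) && decide (n ≤ 300))) : Nat) : Int) ∧
    (l.foldl cajonesStep (ll, ju, caj)).2.2.length
        = (caj.length + l.countP (fun n => decide (200 ≤ n) && decide (n ≤ 300))) % 100 := by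
  induction l with
  | nil =>
    intro ll ju caj h
    refine ⟨?_, ?_, ?_⟩ <;> simp <;> omega
  | cons n t ih =>
    intro ll ju caj h
    by_cases hp : 200 ≤ n ∧ n ≤ 300
    · have hpb : (decide (200 ≤ n) && decide (n ≤ 300)) = true := by
        simp [hp.1, hp.2]
      by_cases hfull : caj.length + 1 = 100
      · have hstep : cajonesStep (ll, ju, caj) n = (ll + 1, ju, []) := by
          simp [cajonesStep, hp, hfull]
        obtain ⟨ih1, ih2, ih3⟩ := ih (ll + 1) ju [] (by simp)
        rw [List.foldl_cons, hstep]
        refine ⟨?_, ?_, ?_⟩ <;>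
          simp [ih1, ih2, ih3, List.countP_cons, hpb] <;>
          omega
      · have hstep : cajonesStep (ll, ju, caj) n = (ll, ju, caj ++ [n]) := by
          simp [cajonesStep, hp, hfull]
        obtain ⟨ih1, ih2, ih3⟩ := ih ll ju (caj ++ [n]) (by simp; omega)
        rw [List.foldl_cons, hstep]
        refine ⟨?_, ?_, ?_⟩ <;>
          simp [ih1, ih2, ih3, List.countP_cons, hpb] <;>
          omega
    · have hpb : (decide (200 ≤ n) && decide (n ≤ 300)) = false := by
        simp only [Bool.and_eq_false_iff, decide_eq_false_iff_not]; tauto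
      have hstep : cajonesStep (ll, ju, caj) n = (ll, ju + 1, caj) := by
        simp [cajonesStep, hp]
      obtain ⟨ih1, ih2, ih3⟩ := ih ll (ju + 1) caj h
      rw [List.foldl_cons, hstep]
      refine ⟨?_, ?_, ?_⟩ <;>
        simp only [ih1, ih2, ih3, List.countP_cons, hpb] <;>
        simp <;> omega

-- ===== VERDICT (by name: the statement is the Claim_ definition above) =====
theorem cajones_spec : Claim_equal_cajones := by
  intro l _
  unfold Spec_cajones cajones cajones_alt
  obtain ⟨h1, h2, h3⟩ := cajones_fold_inv l 0 0 [] (by simp)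
  have hsum := List.length_eq_countP_add_countP
    (p := fun n => decide (200 ≤ n) && decide (n ≤ 300)) (l := l)
  simp only [Bool.decide_eq_true, decide_not] at hsum
  refine Prod.ext ?_ (Prod.ext ?_ ?_)
  · simpa using h1
  · simp only [h2]; omega
  · by_cases hne : (l.foldl cajonesStep (0, 0, [])).2.2 = []
    · simp only [hne, ne_eq, not_true_eq_false, if_false]
      simp only [hne, List.length_nil, List.length_nil, Nat.zero_add] at h3
      omega
    · simp only [ne_eq, hne, not_false_eq_true, if_true, h3]
      simp
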